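-- pv_equiv track=rewrite | github.com/bambamshivam/Codeforces | Problems/1538F.py | co
-- ===== SOURCE A (Python) =====
-- def co(n):
-- 	k=p=n
-- 	c=0
-- 	while n>0:
-- 		n//=10
-- 		c+=1
-- 	c-=1
-- 	s=0
-- 	t=0
-- 	while c>0:
-- 		x=k//(10**c)
-- 		x-=t
-- 		t+=x
-- 		s+=((c+1)*x)
-- 		p-=x
-- 		c-=1
-- 	s+=(p-1)
-- 	return s
-- ===== SOURCE B (Python) =====
-- def co(n):
--     s = n - 1
--     m = n // 10
--     while m > 0:
--         s += m
--         m //= 10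
--     return s
-- ===== Notes on version B (the rewrite author's own statement) =====
-- stated objective: simpler
-- what changed: Replaces A's two loops (digit counting, then per-digit prefix extraction with t/p bookkeeping and weighted increments) by a single loop that adds the successive floor-divisions of n by growing powers of ten onto n-1; the non-positive case falls out of the same loop since the first quotient is then non-positive.
import Mathlib
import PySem

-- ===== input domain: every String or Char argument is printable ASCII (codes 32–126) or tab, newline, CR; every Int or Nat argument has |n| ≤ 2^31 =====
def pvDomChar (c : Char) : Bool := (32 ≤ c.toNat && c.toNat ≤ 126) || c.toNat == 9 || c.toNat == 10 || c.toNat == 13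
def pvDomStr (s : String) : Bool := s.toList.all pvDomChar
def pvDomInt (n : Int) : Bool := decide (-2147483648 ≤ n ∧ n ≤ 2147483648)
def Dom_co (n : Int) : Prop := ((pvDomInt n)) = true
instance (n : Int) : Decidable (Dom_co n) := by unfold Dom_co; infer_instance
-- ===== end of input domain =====

-- B replaces A's digit-count loop plus prefix-extraction/t-tracking loop by one loop summing
-- the repeated floor-divisions n//10 + n//100 + … onto n-1 (objective: simpler).

-- ===== PORT A =====
-- first while loop: n//=10, c+=1 while n>0; returns final c
def coCount (n : Int) (c : Int) : Int :=
  if h : 0 < n then coCount (PySem.Int.floordiv n 10) (c + 1) else c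
termination_by n.toNat
decreasing_by
  rw [PySem.Int.floordiv_eq_ediv_of_pos (by norm_num)]
  omega

-- second while loop over (s, t, p); 10**c ported as 10 ^ c.toNat (exact, since 0 < c inside the loop)
def coLoop (k : Int) (c : Int) (s : Int) (t : Int) (p : Int) : Int × Int × Int :=
  if h : 0 < c then
    let x := PySem.Int.floordiv k (10 ^ c.toNat) - t
    coLoop k (c - 1) (s + (c + 1) * x) (t + x) (p - x)
  else (s, t, p)
termination_by c.toNat
decreasing_by omega

def co (n : Int) : Int :=
  let k := n
  let p := n
  let c := coCount n 0 - 1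
  let r := coLoop k c 0 0 p
  r.1 + (r.2.2 - 1)

-- ===== PORT B =====
def altLoop (m : Int) (s : Int) : Int :=
  if h : 0 < m then altLoop (PySem.Int.floordiv m 10) (s + m) else s
termination_by m.toNat
decreasing_by
  rw [PySem.Int.floordiv_eq_ediv_of_pos (by norm_num)]
  omega

def co_alt (n : Int) : Int :=
  altLoop (PySem.Int.floordiv n 10) (n - 1)

-- ===== PRECONDITION & SPEC =====
def Spec_co (n : Int) (out : Int) : Prop := out = co_alt n
instance (n : Int) (out : Int) : Decidable (Spec_co n out) := by unfold Spec_co; infer_instance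

-- ===== CLAIM (what is proved, stated in full; the proofs are below) =====
def Claim_equal_co : Prop := ∀ (n : Int), Dom_co n → Spec_co n (co n)

-- ===== LEMMAS AND PROOFS =====

-- T m = m + m//10 + m//100 + … (0 for m ≤ 0): the value altLoop accumulates
def T (m : Int) : Int :=
  if h : 0 < m then m + T (PySem.Int.floordiv m 10) else 0
termination_by m.toNat
decreasing_by
  rw [PySem.Int.floordiv_eq_ediv_of_pos (by norm_num)]
  omega

-- Sum10 k c = Σ_{j=1}^{c} k // 10^j
def Sum10 (k : Int) : Nat → Int
  | 0 => 0
  | c + 1 => PySem.Int.floordiv k (10 ^ (c + 1)) + Sum10 k c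

theorem altLoop_eq (m s : Int) : altLoop m s = s + T m := by
  induction m, s using altLoop.induct with
  | case1 m s h ih =>
    rw [altLoop, T, dif_pos h, dif_pos h, ih]
    ring
  | case2 m s h =>
    rw [altLoop, T, dif_neg h, dif_neg h]
    ring

theorem T_nonpos {m : Int} (h : m ≤ 0) : T m = 0 := by
  rw [T, dif_neg (by omega)]

theorem floordiv_pow_succ (k : Int) (c : Nat) :
    PySem.Int.floordiv k (10 ^ (c + 1)) =
      PySem.Int.floordiv (PySem.Int.floordiv k 10) (10 ^ c) := by
  rw [PySem.Int.floordiv_eq_ediv_of_pos (by positivity),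
      PySem.Int.floordiv_eq_ediv_of_pos (by norm_num),
      PySem.Int.floordiv_eq_ediv_of_pos (by positivity)]
  rw [Int.ediv_ediv_of_nonneg (by norm_num)]
  norm_num [pow_succ, mul_comm]

theorem sum10_shift (k : Int) (c : Nat) :
    Sum10 k (c + 1) = PySem.Int.floordiv k 10 + Sum10 (PySem.Int.floordiv k 10) c := by
  induction c with
  | zero =>
    have h0 : Sum10 (PySem.Int.floordiv k 10) 0 = 0 := rfl
    have h1 : Sum10 k 1 = PySem.Int.floordiv k (10 ^ 1) + 0 := rfl
    rw [h0, h1]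
    norm_num
  | succ c ih =>
    rw [Sum10, ih, Sum10, floordiv_pow_succ k]
    ring

theorem sum10_zero (c : Nat) : Sum10 0 c = 0 := by
  induction c with
  | zero => rfl
  | succ c ih =>
    rw [Sum10, ih, PySem.Int.floordiv_eq_ediv_of_pos (by positivity)]
    simp

-- the second loop of A computes (before the final p-1) s + p + Σ_{j=1}^{c} k//10^j - c*t
theorem coLoop_eq (k : Int) (c : Nat) (s t p : Int) :
    (coLoop k c s t p).1 + (coLoop k c s t p).2.2 =
      s + p + Sum10 k c - c * t := by
  induction c generalizing s t p with
  | zero =>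
    rw [coLoop, dif_neg (by omega)]
    have h0 : Sum10 k 0 = 0 := rfl
    rw [h0]
    push_cast
    ring
  | succ c ih =>
    rw [coLoop, dif_pos (by exact_mod_cast Nat.succ_pos c : (0:Int) < ((c+1 : Nat):Int))]
    have h1 : ((c + 1 : Nat) : Int) - 1 = (c : Int) := by push_cast; ring
    have h2 : (((c + 1 : Nat) : Int)).toNat = c + 1 := by omega
    rw [h1, h2, ih, Sum10]
    push_cast
    ring

theorem coCount_shift (n : Int) (c : Int) : coCount n c = coCount n 0 + c := by
  by_cases h : 0 < n
  · conv_lhs => rw [coCount, dif_pos h]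
    conv_rhs => rw [coCount, dif_pos h]
    rw [coCount_shift (PySem.Int.floordiv n 10) (c + 1),
        coCount_shift (PySem.Int.floordiv n 10) (0 + 1)]
    ring
  · rw [coCount, dif_neg h, coCount, dif_neg h]
    ring
termination_by n.toNat
decreasing_by all_goals
  rw [PySem.Int.floordiv_eq_ediv_of_pos (by norm_num)]
  omega

theorem coCount_nonneg (n : Int) : 0 ≤ coCount n 0 := by
  by_cases h : 0 < n
  · rw [coCount, dif_pos h, coCount_shift]
    have := coCount_nonneg (PySem.Int.floordiv n 10)
    omega
  · rw [coCount, dif_neg h]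
termination_by n.toNat
decreasing_by
  rw [PySem.Int.floordiv_eq_ediv_of_pos (by norm_num)]
  omega

theorem coCount_lt (n : Int) (hn : 0 ≤ n) : n < 10 ^ (coCount n 0).toNat := by
  by_cases h : 0 < n
  · rw [coCount, dif_pos h, coCount_shift]
    have hm : PySem.Int.floordiv n 10 = n / 10 :=
      PySem.Int.floordiv_eq_ediv_of_pos (by norm_num)
    have hmn : 0 ≤ PySem.Int.floordiv n 10 := by rw [hm]; omega
    have ihm := coCount_lt (PySem.Int.floordiv n 10) hmn
    have hnn := coCount_nonneg (PySem.Int.floordiv n 10)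
    have ht : (coCount (PySem.Int.floordiv n 10) 0 + (0 + 1)).toNat =
        (coCount (PySem.Int.floordiv n 10) 0).toNat + 1 := by omega
    rw [ht, pow_succ]
    rw [hm] at ihm hmn
    have hstep : n / 10 + 1 ≤ 10 ^ (coCount (PySem.Int.floordiv n 10) 0).toNat := by
      rw [hm]; omega
    have h10 : 10 * (n / 10 + 1) ≤ 10 * 10 ^ (coCount (PySem.Int.floordiv n 10) 0).toNat := by
      omega
    have hlt10 : n < 10 * (n / 10 + 1) := by omega
    calc n < 10 * (n / 10 + 1) := hlt10
      _ ≤ 10 * 10 ^ (coCount (PySem.Int.floordiv n 10) 0).toNat := h10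
      _ = 10 ^ (coCount (PySem.Int.floordiv n 10) 0).toNat * 10 := by ring
  · rw [coCount, dif_neg h]
    norm_num
    omega
termination_by n.toNat
decreasing_by
  rw [PySem.Int.floordiv_eq_ediv_of_pos (by norm_num)]
  omega

-- T (k//10) = Σ_{j=1}^{c} k//10^j once the tail k//10^(c+1) vanishes
theorem T_eq_sum10 (c : Nat) :
    ∀ k : Int, 0 ≤ k → PySem.Int.floordiv k (10 ^ (c + 1)) = 0 →
      T (PySem.Int.floordiv k 10) = Sum10 k c := by
  induction c with
  | zero =>
    intro k hk h0
    rw [pow_one] at h0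
    rw [h0, T_nonpos (by norm_num)]
    rfl
  | succ c ih =>
    intro k hk h0
    have hm : PySem.Int.floordiv k 10 = k / 10 :=
      PySem.Int.floordiv_eq_ediv_of_pos (by norm_num)
    have hmn : 0 ≤ PySem.Int.floordiv k 10 := by rw [hm]; omega
    rw [sum10_shift k]
    by_cases hpos : 0 < PySem.Int.floordiv k 10
    · rw [T, dif_pos hpos]
      have htail : PySem.Int.floordiv (PySem.Int.floordiv k 10) (10 ^ (c + 1)) = 0 := by
        rw [← floordiv_pow_succ k]
        exact h0
      rw [ih (PySem.Int.floordiv k 10) hmn htail]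
    · have hz : PySem.Int.floordiv k 10 = 0 := by omega
      rw [hz, T_nonpos (by norm_num), sum10_zero]
      norm_num

theorem co_eq_alt (n : Int) : co n = co_alt n := by
  have hco : co n = (coLoop n (coCount n 0 - 1) 0 0 n).1 +
      ((coLoop n (coCount n 0 - 1) 0 0 n).2.2 - 1) := rfl
  have halt : co_alt n = (n - 1) + T (PySem.Int.floordiv n 10) := by
    unfold co_alt
    rw [altLoop_eq]
  rw [hco, halt]
  by_cases h : 0 < n
  · -- positive n: digit count ≥ 1, the loop identity and the tail lemma apply
    have hd1 : 1 ≤ coCount n 0 := by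
      rw [coCount, dif_pos h, coCount_shift]
      have := coCount_nonneg (PySem.Int.floordiv n 10)
      omega
    set d := coCount n 0 with hd
    have hC : (d - 1) = ((d - 1).toNat : Int) := by omega
    have hloop := coLoop_eq n (d - 1).toNat 0 0 n
    rw [← hC] at hloop
    have hlt := coCount_lt n (by omega)
    rw [← hd] at hlt
    have htoNat : (d - 1).toNat + 1 = d.toNat := by omega
    have htail : PySem.Int.floordiv n (10 ^ ((d - 1).toNat + 1)) = 0 := by
      rw [htoNat, PySem.Int.floordiv_eq_ediv_of_pos (by positivity)]
      exact Int.ediv_eq_zero_of_lt (by omega) hlt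
    have hsum := T_eq_sum10 (d - 1).toNat n (by omega) htail
    omega
  · -- n ≤ 0: both sides are n - 1
    have hc : coCount n 0 = 0 := by rw [coCount, dif_neg h]
    have hT : T (PySem.Int.floordiv n 10) = 0 := by
      apply T_nonpos
      rw [PySem.Int.floordiv_eq_ediv_of_pos (by norm_num)]
      calc n / 10 ≤ 0 / 10 := Int.ediv_le_ediv (by norm_num) (by omega)
        _ = 0 := by norm_num
    have hl : coLoop n (0 - 1) 0 0 n = (0, 0, n) := by
      rw [coLoop, dif_neg (by norm_num)]
    rw [hc, hl, hT]
    ring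

-- ===== VERDICT (by name: the statement is the Claim_ definition above) =====
theorem co_spec : Claim_equal_co := by
  intro n _
  unfold Spec_co
  exact co_eq_alt n
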